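-- pv_equiv track=rewrite | github.com/jbaines-r7/badblood | badblood.py | filter_addresses
-- ===== SOURCE A (Python) =====
-- def filter_addresses(address_list):
--     return_list = []
--     visited_set = set()
--
--     for address in address_list:
--         if address not in visited_set:
--             return_list.append(address)
--             visited_set.add(address)
--             visited_set.add(address - 0x50)
--             visited_set.add(address + 0x170)
--             visited_set.add(address + 0x1c0)
--
--     return return_list
-- ===== SOURCE B (Python) =====
-- def filter_addresses(address_list):
--     # Sieve: keep the head, delete everything it blocks from the tail, recurse.
--     # No visited-set is maintained; blocked elements are removed eagerly instead.
--     result = []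
--     pending = list(address_list)
--     while pending:
--         a = pending[0]
--         result.append(a)
--         blocked = (a, a - 0x50, a + 0x170, a + 0x1c0)
--         pending = [b for b in pending[1:] if b not in blocked]
--     return result
-- ===== Notes on version B (the rewrite author's own statement) =====
-- stated objective: alternative
-- what changed: Replaces the single-pass visited-set filter with an Eratosthenes-style sieve: keep the first pending address, eagerly delete its four blocked offsets from the rest of the list, and repeat on what survives - no set data structure and no per-element membership test against accumulated state.
import Mathlib
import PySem

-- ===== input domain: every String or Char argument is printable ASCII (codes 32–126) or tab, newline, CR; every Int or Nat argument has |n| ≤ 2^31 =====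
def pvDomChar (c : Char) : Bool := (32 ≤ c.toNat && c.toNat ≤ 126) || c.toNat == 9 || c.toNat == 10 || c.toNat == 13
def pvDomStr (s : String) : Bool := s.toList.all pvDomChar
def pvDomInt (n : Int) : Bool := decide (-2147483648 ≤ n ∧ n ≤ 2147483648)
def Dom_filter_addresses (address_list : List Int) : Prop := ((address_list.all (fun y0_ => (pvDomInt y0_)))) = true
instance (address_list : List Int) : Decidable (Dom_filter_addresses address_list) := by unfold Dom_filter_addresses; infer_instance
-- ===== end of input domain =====

-- B replaces A's visited-set filter with a sieve: keep the head, eagerly delete the four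
-- addresses it blocks from the rest, recurse; alternative algorithm, similar cost.


-- ===== PORT A =====
-- loop body of A: skip if address is in the visited set, else append and add the 4-element zone
def stepA (st : List Int × PySem.Set Int) (address : Int) : List Int × PySem.Set Int :=
  if PySem.Set.contains st.2 address then st
  else (st.1 ++ [address],
    PySem.Set.add (PySem.Set.add (PySem.Set.add (PySem.Set.add st.2 address)
      (address - 0x50)) (address + 0x170)) (address + 0x1c0))

def filter_addresses (address_list : List Int) : List Int :=
  (address_list.foldl stepA ([], PySem.Set.empty)).1

-- ===== PORT B =====
-- sieve loop of Source B: take the first pending address, drop the four blocked values from the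
-- rest of the pending list, continue on the survivors
def filter_addresses_alt : List Int → List Int
  | [] => []
  | a :: rest =>
      a :: filter_addresses_alt (rest.filter fun b =>
        !(b == a || b == a - 0x50 || b == a + 0x170 || b == a + 0x1c0))
  termination_by l => l.length
  decreasing_by
    simpa using Nat.lt_succ_of_le (List.length_filter_le _ _)

-- ===== PRECONDITION & SPEC =====
def Spec_filter_addresses (address_list : List Int) (out : List Int) : Prop := out = filter_addresses_alt address_list
instance (address_list : List Int) (out : List Int) : Decidable (Spec_filter_addresses address_list out) := by unfold Spec_filter_addresses; infer_instance

-- ===== CLAIM (what is proved, stated in full; the proofs are below) =====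
def Claim_equal_filter_addresses : Prop := ∀ (address_list : List Int), Dom_filter_addresses address_list → Spec_filter_addresses address_list (filter_addresses address_list)

-- ===== LEMMAS AND PROOFS =====

-- the four-element zone A records when it keeps a
def inZone (a b : Int) : Bool := b == a || b == a - 0x50 || b == a + 0x170 || b == a + 0x1c0

def addZone (v : PySem.Set Int) (a : Int) : PySem.Set Int :=
  PySem.Set.add (PySem.Set.add (PySem.Set.add (PySem.Set.add v a)
    (a - 0x50)) (a + 0x170)) (a + 0x1c0)

-- A's loop, as the list it still appends from state-set v
def fA (v : PySem.Set Int) : List Int → List Int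
  | [] => []
  | a :: l => if PySem.Set.contains v a then fA v l else a :: fA (addZone v a) l

lemma foldl_stepA_eq (l : List Int) (r : List Int) (v : PySem.Set Int) :
    (l.foldl stepA (r, v)).1 = r ++ fA v l := by
  induction l generalizing r v with
  | nil => simp [fA]
  | cons a l ih =>
    simp only [List.foldl_cons, stepA, fA]
    by_cases h : PySem.Set.contains v a = true
    · rw [if_pos h, if_pos h]; exact ih r v
    · rw [if_neg h, if_neg h]
      show (l.foldl stepA (r ++ [a], addZone v a)).1 = _
      rw [ih]; simp

lemma contains_addZone (v : PySem.Set Int) (a x : Int) :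
    PySem.Set.contains (addZone v a) x = (PySem.Set.contains v x || inZone a x) := by
  rw [Bool.eq_iff_iff]
  simp only [addZone, inZone, Bool.or_eq_true, PySem.Set.contains_iff, PySem.Set.mem_add,
    beq_iff_eq]
  tauto

-- sieving the pending list by zone a is the same as adding zone a to A's state
lemma fA_zone (l : List Int) (v w : PySem.Set Int) (a : Int)
    (h : ∀ x, PySem.Set.contains w x = (PySem.Set.contains v x || inZone a x)) :
    fA w l = fA v (l.filter fun b => !inZone a b) := by
  induction l generalizing v w with
  | nil => simp [fA]
  | cons c l ih =>
    simp only [fA]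
    by_cases hz : inZone a c = true
    · have hw : PySem.Set.contains w c = true := by rw [h, hz]; simp
      have hf : List.filter (fun b => !inZone a b) (c :: l)
          = List.filter (fun b => !inZone a b) l := by simp [List.filter, hz]
      rw [if_pos hw, hf]
      exact ih v w h
    · have hw : PySem.Set.contains w c = PySem.Set.contains v c := by
        rw [h]; simp [hz]
      have hf : List.filter (fun b => !inZone a b) (c :: l)
          = c :: List.filter (fun b => !inZone a b) l := by simp [List.filter, hz]
      rw [hf]
      simp only [fA]
      rw [hw]
      by_cases hv : PySem.Set.contains v c = true
      · rw [if_pos hv, if_pos hv]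
        exact ih v w h
      · have h' : ∀ x, PySem.Set.contains (addZone w c) x
            = (PySem.Set.contains (addZone v c) x || inZone a x) := by
          intro x
          rw [contains_addZone, contains_addZone, h]
          cases PySem.Set.contains v x <;> cases inZone a x <;> cases inZone c x <;> rfl
        rw [if_neg hv, if_neg hv]
        rw [ih _ _ h']

lemma fA_empty_eq_alt (l : List Int) : fA PySem.Set.empty l = filter_addresses_alt l := by
  induction hn : l.length using Nat.strong_induction_on generalizing l with
  | _ n ih =>
    cases l with
    | nil => simp [fA, filter_addresses_alt]
    | cons a l =>
      have hc : PySem.Set.contains PySem.Set.empty a = false := rfl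
      have h : ∀ x, PySem.Set.contains (addZone PySem.Set.empty a) x
          = (PySem.Set.contains PySem.Set.empty x || inZone a x) := fun x =>
        contains_addZone _ a x
      rw [filter_addresses_alt]
      simp only [fA, hc, Bool.false_eq_true, if_neg, not_false_eq_true]
      rw [fA_zone l _ _ a h]
      congr 1
      · exact ih _ (by subst hn; simpa using Nat.lt_succ_of_le (List.length_filter_le _ _)) _ rfl

-- ===== VERDICT (by name: the statement is the Claim_ definition above) =====
theorem filter_addresses_spec : Claim_equal_filter_addresses := by
  intro address_list _
  show filter_addresses address_list = filter_addresses_alt address_list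
  rw [filter_addresses, foldl_stepA_eq, fA_empty_eq_alt]
  rfl
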